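-- pv_equiv track=rewrite | github.com/AnupamaSharma2000/congress-vote-tracker | scripts/02_fetch_member_profiles.py | sentiment_label
-- ===== SOURCE A (Python) =====
-- NEGATIVE_KEYWORDS = [
--     "scandal", "indicted", "indict", "resign", "fraud", "investigation",
--     "arrested", "charged", "convicted", "impeach", "bribery", "corruption",
--     "lawsuit", "misconduct", "allegation", "accused", "probe", "subpoena",
--     "censure", "expel", "ethics violation",
-- ]
--
-- def sentiment_label(title: str) -> str:
--     """
--     Assign a simple heuristic sentiment label to a news headline.
--
--     Returns "Negative" if the lowercased title contains any keyword from
--     NEGATIVE_KEYWORDS, otherwise "Neutral".  This is intentionally minimal —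
--     replace with a proper NLP model for production use.
--     """
--     if not isinstance(title, str):
--         return "Neutral"
--     lower = title.lower()
--     for kw in NEGATIVE_KEYWORDS:
--         if kw in lower:
--             return "Negative"
--     return "Neutral"
-- ===== SOURCE B (Python) =====
-- NEGATIVE_KEYWORDS = [
--     "scandal", "indicted", "indict", "resign", "fraud", "investigation",
--     "arrested", "charged", "convicted", "impeach", "bribery", "corruption",
--     "lawsuit", "misconduct", "allegation", "accused", "probe", "subpoena",
--     "censure", "expel", "ethics violation",
-- ]
--
-- def sentiment_label(title: str) -> str:
--     if not isinstance(title, str):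
--         return "Neutral"
--     lower = title.lower()
--     # Single left-to-right scan over the title: at each position, test whether
--     # any keyword starts exactly there (suffix-major instead of keyword-major).
--     for i in range(len(lower) + 1):
--         for kw in NEGATIVE_KEYWORDS:
--             if lower.startswith(kw, i):
--                 return "Negative"
--     return "Neutral"
-- ===== Notes on version B (the rewrite author's own statement) =====
-- stated objective: alternative
-- what changed: B replaces A's keyword-major membership loop (one full substring scan per keyword) with a single position-major scan of the lowered title that tests all keyword prefixes at each index.
import Mathlib
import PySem

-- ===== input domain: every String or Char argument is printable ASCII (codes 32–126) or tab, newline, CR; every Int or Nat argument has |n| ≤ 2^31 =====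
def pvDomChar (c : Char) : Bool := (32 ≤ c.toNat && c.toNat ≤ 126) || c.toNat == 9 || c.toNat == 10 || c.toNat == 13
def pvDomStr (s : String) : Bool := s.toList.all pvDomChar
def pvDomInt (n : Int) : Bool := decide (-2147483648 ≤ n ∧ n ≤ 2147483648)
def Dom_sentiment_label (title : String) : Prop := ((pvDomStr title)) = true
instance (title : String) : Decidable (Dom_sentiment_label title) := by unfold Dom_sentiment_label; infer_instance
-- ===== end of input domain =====

-- B replaces A's keyword-major membership loop with a single position-major scan of the lowered title (alternative traversal, same cost class).


def negativeKeywords : List String :=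
  ["scandal", "indicted", "indict", "resign", "fraud", "investigation",
   "arrested", "charged", "convicted", "impeach", "bribery", "corruption",
   "lawsuit", "misconduct", "allegation", "accused", "probe", "subpoena",
   "censure", "expel", "ethics violation"]

-- ===== PORT A =====
-- A's keyword loop: for kw in NEGATIVE_KEYWORDS: if kw in lower: return "Negative"
def aLoop (lower : String) : List String → String
  | [] => "Neutral"
  | kw :: rest => if PySem.Str.isIn kw lower then "Negative" else aLoop lower rest

def sentiment_label (title : String) : String :=
  let lower := PySem.Str.lower title
  aLoop lower negativeKeywords

-- ===== PORT B =====
-- B's position loop: for each index i of the lowered title (including the end),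
-- test lower.startswith(kw, i) for every keyword; recursion on the suffix.
def bScan (kws : List (List Char)) : List Char → String
  | [] => if kws.any (fun kw => kw.isPrefixOf []) then "Negative" else "Neutral"
  | c :: t => if kws.any (fun kw => kw.isPrefixOf (c :: t)) then "Negative" else bScan kws t

def sentiment_label_alt (title : String) : String :=
  bScan (negativeKeywords.map String.toList) (PySem.Str.lower title).toList

-- ===== PRECONDITION & SPEC =====
def Spec_sentiment_label (title : String) (out : String) : Prop := out = sentiment_label_alt title
instance (title : String) (out : String) : Decidable (Spec_sentiment_label title out) := by unfold Spec_sentiment_label; infer_instance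

-- ===== CLAIM (what is proved, stated in full; the proofs are below) =====
def Claim_equal_sentiment_label : Prop := ∀ (title : String), Dom_sentiment_label title → Spec_sentiment_label title (sentiment_label title)

-- ===== LEMMAS AND PROOFS =====

-- A's loop returns "Negative" exactly when some keyword is an infix of the lowered title.
theorem aLoop_eq (lower : String) (kws : List String) :
    aLoop lower kws =
      if kws.any (fun kw => decide (kw.toList <:+: lower.toList)) then "Negative" else "Neutral" := by
  induction kws with
  | nil => rfl
  | cons kw rest ih =>
    simp only [aLoop, List.any_cons, ih]
    by_cases h : kw.toList <:+: lower.toList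
    · have ht : PySem.Chars.isIn kw.toList lower.toList = true :=
        (PySem.Chars.isIn_iff_infix _ _).mpr h
      simp [ht, h]
    · have hf : PySem.Chars.isIn kw.toList lower.toList = false :=
        (PySem.Chars.isIn_eq_false_iff _ _).mpr h
      simp [hf, h]

-- B's scan returns "Negative" exactly when some keyword is an infix of the scanned list.
theorem bScan_eq (kws : List (List Char)) (s : List Char) :
    bScan kws s = if kws.any (fun kw => decide (kw <:+: s)) then "Negative" else "Neutral" := by
  induction s with
  | nil =>
    simp [bScan, List.isPrefixOf_iff_prefix, List.prefix_nil, List.infix_nil]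
  | cons c t ih =>
    simp only [bScan, ih]
    by_cases h : ∃ kw ∈ kws, kw <+: c :: t
    · obtain ⟨kw, hm, hp⟩ := h
      have h1 : kws.any (fun kw => kw.isPrefixOf (c :: t)) = true := by
        simp only [List.any_eq_true]
        exact ⟨kw, hm, (List.isPrefixOf_iff_prefix).mpr hp⟩
      have h2 : kws.any (fun kw => decide (kw <:+: c :: t)) = true := by
        simp only [List.any_eq_true, decide_eq_true_eq]
        exact ⟨kw, hm, hp.isInfix⟩
      simp [h1, h2]
    · have h1 : kws.any (fun kw => kw.isPrefixOf (c :: t)) = false := by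
        simp only [List.any_eq_false]
        intro kw hm
        simp only [List.isPrefixOf_iff_prefix]
        exact fun hp => h ⟨kw, hm, hp⟩
      have h3 : (kws.any (fun kw => decide (kw <:+: c :: t)))
              = (kws.any (fun kw => decide (kw <:+: t))) := by
        rw [Bool.eq_iff_iff]
        simp only [List.any_eq_true, decide_eq_true_eq]
        constructor
        · rintro ⟨kw, hm, hi⟩
          rcases List.infix_cons_iff.mp hi with hp | hi'
          · exact absurd ⟨kw, hm, hp⟩ h
          · exact ⟨kw, hm, hi'⟩
        · rintro ⟨kw, hm, hi⟩
          exact ⟨kw, hm, List.infix_cons_iff.mpr (Or.inr hi)⟩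
      simp [h1, h3]

-- ===== VERDICT (by name: the statement is the Claim_ definition above) =====
theorem sentiment_label_spec : Claim_equal_sentiment_label := by
  intro title _
  unfold Spec_sentiment_label sentiment_label sentiment_label_alt
  rw [aLoop_eq, bScan_eq]
  simp only [List.any_map, Function.comp_def]
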